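-- pv_equiv track=rewrite | github.com/ribalda/adventofcode | 2023/11/step1_2.py | distance_axis
-- ===== SOURCE A (Python) =====
-- def distance_axis(a, b, empty, expand):
--     fr = int(min(a, b))
--     to = int(max(a, b))
--     out = to - fr
--     extra = 0
--     for i in range(fr + 1, to):
--         if i in empty:
--             extra += expand - 1
--
--     return out + extra
-- ===== SOURCE B (Python) =====
-- def distance_axis(a, b, empty, expand):
--     fr, to = (int(a), int(b)) if a <= b else (int(b), int(a))
--     between = {e for e in empty if fr < e < to}
--     return (to - fr) + (expand - 1) * len(between)
-- ===== Notes on version B (the rewrite author's own statement) =====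
-- stated objective: alternative
-- what changed: Replaces the element-by-element scan of the whole integer interval (with a linear membership test per position) by one filter-and-dedup pass over the empty list; cost moves from O(|b-a|*len(empty)) to O(len(empty)), which is not faster when the interval is narrow and the list long.
import Mathlib
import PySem

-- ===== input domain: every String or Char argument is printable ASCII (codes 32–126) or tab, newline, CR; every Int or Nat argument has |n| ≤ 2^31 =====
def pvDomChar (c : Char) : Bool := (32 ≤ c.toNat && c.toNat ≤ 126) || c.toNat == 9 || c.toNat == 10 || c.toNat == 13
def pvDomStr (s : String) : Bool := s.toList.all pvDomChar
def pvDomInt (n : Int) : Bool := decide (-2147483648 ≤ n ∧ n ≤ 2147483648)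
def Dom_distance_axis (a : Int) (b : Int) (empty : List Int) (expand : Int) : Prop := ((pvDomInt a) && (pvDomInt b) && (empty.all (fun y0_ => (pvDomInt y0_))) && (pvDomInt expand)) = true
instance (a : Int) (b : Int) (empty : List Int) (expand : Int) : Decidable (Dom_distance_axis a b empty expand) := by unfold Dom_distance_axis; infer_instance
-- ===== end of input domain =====

-- B replaces A's scan of every integer position between the coordinates by one filter-and-dedup
-- pass over the empty list (an alternative decomposition; cost depends on interval width vs list length).


-- ===== PORT A =====
def distance_axis (a : Int) (b : Int) (empty : List Int) (expand : Int) : Int :=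
  let fr := min a b
  let tob := max a b
  let out := tob - fr
  let extra := (PySem.List.pyRange (fr + 1) tob 1).foldl
    (fun extra i => if i ∈ empty then extra + (expand - 1) else extra) 0
  out + extra

-- ===== PORT B =====
def distance_axis_alt (a : Int) (b : Int) (empty : List Int) (expand : Int) : Int :=
  let p := if a ≤ b then (a, b) else (b, a)
  let fr := p.1
  let tob := p.2
  let between : PySem.Set Int := PySem.Set.ofList (empty.filter (fun e => fr < e && e < tob))
  (tob - fr) + (expand - 1) * PySem.Set.len between

-- ===== PRECONDITION & SPEC =====
def Spec_distance_axis (a : Int) (b : Int) (empty : List Int) (expand : Int) (out : Int) : Prop := out = distance_axis_alt a b empty expand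
instance (a : Int) (b : Int) (empty : List Int) (expand : Int) (out : Int) : Decidable (Spec_distance_axis a b empty expand out) := by unfold Spec_distance_axis; infer_instance

-- ===== CLAIM (what is proved, stated in full; the proofs are below) =====
def Claim_equal_distance_axis : Prop := ∀ (a : Int) (b : Int) (empty : List Int) (expand : Int), Dom_distance_axis a b empty expand → Spec_distance_axis a b empty expand (distance_axis a b empty expand)

-- ===== LEMMAS AND PROOFS =====

-- A's loop sums (expand-1) once per range position that is in `empty`.
theorem foldl_if_count (empty : List Int) (c : Int) (l : List Int) (s : Int) :
    l.foldl (fun acc i => if i ∈ empty then acc + c else acc) s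
      = s + c * (l.countP (fun i => decide (i ∈ empty))) := by
  induction l generalizing s with
  | nil => simp
  | cons x xs ih =>
    simp only [List.foldl_cons, List.countP_cons, ih]
    by_cases h : x ∈ empty <;> simp [h] <;> ring

-- the range positions that are in `empty` are exactly the distinct empties strictly between fr and tob
theorem count_range_eq_set (fr tob : Int) (empty : List Int) :
    ((PySem.List.pyRange (fr + 1) tob 1).countP (fun i => decide (i ∈ empty)))
      = (PySem.Set.ofList (empty.filter (fun e => fr < e && e < tob))).length := by
  rw [List.countP_eq_length_filter]
  have h1 : ((PySem.List.pyRange (fr + 1) tob 1).filter (fun i => decide (i ∈ empty))).Nodup :=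
    (PySem.List.nodup_pyRange_one _ _).filter _
  have h2 : (PySem.Set.ofList (empty.filter (fun e => fr < e && e < tob))).Nodup :=
    PySem.Set.nodup_ofList _
  have hperm : List.Perm ((PySem.List.pyRange (fr + 1) tob 1).filter (fun i => decide (i ∈ empty)))
      (PySem.Set.ofList (empty.filter (fun e => fr < e && e < tob))) := by
    rw [List.perm_ext_iff_of_nodup h1 h2]
    intro x
    simp [PySem.Set.mem_ofList, List.mem_filter, PySem.List.mem_pyRange_one]
    constructor
    · rintro ⟨⟨h1, h2⟩, h3⟩; exact ⟨h3, by omega, h2⟩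
    · rintro ⟨h3, h1, h2⟩; exact ⟨⟨by omega, h2⟩, h3⟩
  exact hperm.length_eq

-- ===== VERDICT (by name: the statement is the Claim_ definition above) =====
theorem distance_axis_spec : Claim_equal_distance_axis := by
  intro a b empty expand _
  unfold Spec_distance_axis distance_axis distance_axis_alt
  simp only [min_def, max_def]
  by_cases hab : a ≤ b <;>
    simp only [hab, if_true, if_false, foldl_if_count, count_range_eq_set, PySem.Set.len] <;>
    ring
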